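-- pv_equiv track=rewrite | github.com/mateolin-246/actividad-1 | python files/actividad1ejercicio3.py | generar_fibonacci
-- ===== SOURCE A (Python) =====
-- def generar_fibonacci(inicio, iteraciones):
--     a, b = 0, 1
--     serie = []
--
--     for _ in range(inicio - 1):
--         a, b = b, a + b
--
--     for _ in range(iteraciones):
--         serie.append(b)
--         a, b = b, a + b
--
--     return serie
-- ===== SOURCE B (Python) =====
-- def _fib_pair(n):
--     # (F(n), F(n+1)) by fast doubling
--     if n == 0:
--         return (0, 1)
--     a, b = _fib_pair(n >> 1)
--     c = a * (2 * b - a)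
--     d = a * a + b * b
--     if n & 1:
--         return (d, c + d)
--     return (c, d)
--
--
-- def generar_fibonacci(inicio, iteraciones):
--     n = inicio - 1 if inicio > 1 else 0
--     a, b = _fib_pair(n)
--     serie = []
--     for _ in range(iteraciones):
--         serie.append(b)
--         a, b = b, a + b
--     return serie
-- ===== Notes on version B (the rewrite author's own statement) =====
-- stated objective: alternative
-- what changed: The linear warm-up loop that advances to position inicio is replaced by a fast-doubling recursion computing the starting pair (F(n), F(n+1)); the emission loop is unchanged.
import Mathlib
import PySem

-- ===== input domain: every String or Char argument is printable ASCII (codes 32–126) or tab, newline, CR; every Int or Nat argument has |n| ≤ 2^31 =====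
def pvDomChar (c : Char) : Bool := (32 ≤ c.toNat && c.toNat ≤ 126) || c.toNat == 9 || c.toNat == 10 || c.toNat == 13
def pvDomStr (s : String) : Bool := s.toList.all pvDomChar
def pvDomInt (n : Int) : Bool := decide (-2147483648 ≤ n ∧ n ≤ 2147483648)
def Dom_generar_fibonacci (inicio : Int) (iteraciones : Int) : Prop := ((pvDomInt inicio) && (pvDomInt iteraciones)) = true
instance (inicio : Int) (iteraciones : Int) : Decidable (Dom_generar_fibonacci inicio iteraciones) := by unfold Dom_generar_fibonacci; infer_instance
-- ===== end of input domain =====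

-- B computes the starting pair by a fast-doubling recursion instead of A's linear warm-up loop; the emission loop is unchanged.

-- ===== PORT A =====
def generar_fibonacci (inicio : Int) (iteraciones : Int) : List Int :=
  -- a, b = 0, 1 ; for _ in range(inicio - 1): a, b = b, a + b
  let ab := (PySem.List.pyRange 0 (inicio - 1) 1).foldl
    (fun (ab : Int × Int) _ => (ab.2, ab.1 + ab.2)) (0, 1)
  -- serie = [] ; for _ in range(iteraciones): serie.append(b); a, b = b, a + b
  let r := (PySem.List.pyRange 0 iteraciones 1).foldl
    (fun (st : List Int × Int × Int) _ => (st.1 ++ [st.2.2], st.2.2, st.2.1 + st.2.2))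
    ([], ab.1, ab.2)
  r.1

-- ===== PORT B =====
-- _fib_pair(n) = (F(n), F(n+1)) by fast doubling
def pvFibPair (n : Nat) : Int × Int :=
  if h : n = 0 then (0, 1)
  else
    let p := pvFibPair (n / 2)
    let c := p.1 * (2 * p.2 - p.1)
    let d := p.1 * p.1 + p.2 * p.2
    if n % 2 = 1 then (d, c + d) else (c, d)
termination_by n
decreasing_by exact Nat.div_lt_self (Nat.pos_of_ne_zero h) (by omega)

def generar_fibonacci_alt (inicio : Int) (iteraciones : Int) : List Int :=
  -- n = inicio - 1 if inicio > 1 else 0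
  let n : Nat := if inicio > 1 then (inicio - 1).toNat else 0
  let ab := pvFibPair n
  -- serie = [] ; for _ in range(iteraciones): serie.append(b); a, b = b, a + b
  let r := (PySem.List.pyRange 0 iteraciones 1).foldl
    (fun (st : List Int × Int × Int) _ => (st.1 ++ [st.2.2], st.2.2, st.2.1 + st.2.2))
    ([], ab.1, ab.2)
  r.1

-- ===== PRECONDITION & SPEC =====
def Spec_generar_fibonacci (inicio : Int) (iteraciones : Int) (out : List Int) : Prop := out = generar_fibonacci_alt inicio iteraciones
instance (inicio : Int) (iteraciones : Int) (out : List Int) : Decidable (Spec_generar_fibonacci inicio iteraciones out) := by unfold Spec_generar_fibonacci; infer_instance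

-- ===== CLAIM (what is proved, stated in full; the proofs are below) =====
def Claim_equal_generar_fibonacci : Prop := ∀ (inicio : Int) (iteraciones : Int), Dom_generar_fibonacci inicio iteraciones → Spec_generar_fibonacci inicio iteraciones (generar_fibonacci inicio iteraciones)

-- ===== LEMMAS AND PROOFS =====

-- (F(n), F(n+1)) as an Int pair
def pvF (n : Nat) : Int × Int := ((Nat.fib n : Int), (Nat.fib (n + 1) : Int))

theorem pvF_step (j : Nat) : ((pvF j).2, (pvF j).1 + (pvF j).2) = pvF (j + 1) := by
  simp only [pvF, Nat.fib_add_two]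
  push_cast
  ring_nf

theorem foldl_step (l : List Int) (j : Nat) :
    l.foldl (fun (ab : Int × Int) _ => (ab.2, ab.1 + ab.2)) (pvF j) = pvF (j + l.length) := by
  induction l generalizing j with
  | nil => simp
  | cons x xs ih =>
      simp only [List.foldl_cons, List.length_cons]
      rw [pvF_step j, ih (j + 1)]
      ring_nf

theorem pvFibPair_eq (n : Nat) : pvFibPair n = pvF n := by
  induction n using Nat.strong_induction_on with
  | _ n ih =>
    rw [pvFibPair]
    by_cases h : n = 0
    · simp [h, pvF]
    · have hlt : n / 2 < n := Nat.div_lt_self (Nat.pos_of_ne_zero h) (by omega)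
      rw [ih _ hlt]
      have hle : Nat.fib (n / 2) ≤ 2 * Nat.fib (n / 2 + 1) := by
        have := Nat.fib_le_fib_succ (n := n / 2); omega
      have hfe : (Nat.fib (2 * (n / 2)) : Int) =
          (Nat.fib (n / 2) : Int) * (2 * (Nat.fib (n / 2 + 1) : Int) - (Nat.fib (n / 2) : Int)) := by
        have h1 : ((Nat.fib (2 * (n / 2)) : Nat) : Int) =
            ((Nat.fib (n / 2) * (2 * Nat.fib (n / 2 + 1) - Nat.fib (n / 2)) : Nat) : Int) := by
          rw [Nat.fib_two_mul]
        rw [h1, Nat.cast_mul, Int.natCast_sub hle]; push_cast; ring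
      have hfo : (Nat.fib (2 * (n / 2) + 1) : Int) =
          (Nat.fib (n / 2) : Int) * (Nat.fib (n / 2) : Int) + (Nat.fib (n / 2 + 1) : Int) * (Nat.fib (n / 2 + 1) : Int) := by
        have h1 : ((Nat.fib (2 * (n / 2) + 1) : Nat) : Int) =
            ((Nat.fib (n / 2 + 1) ^ 2 + Nat.fib (n / 2) ^ 2 : Nat) : Int) := by
          rw [Nat.fib_two_mul_add_one]
        rw [h1]; push_cast; ring
      by_cases hpar : n % 2 = 1
      · rw [dif_neg h, if_pos hpar]
        simp only [pvF, Prod.mk.injEq]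
        refine ⟨?_, ?_⟩
        · have hn1 : n = 2 * (n / 2) + 1 := by omega
          conv_rhs => rw [hn1]
          exact hfo.symm
        · have h2 : n + 1 = 2 * (n / 2) + 2 := by omega
          conv_rhs => rw [h2]
          have h3 : Nat.fib (2 * (n / 2) + 2) = Nat.fib (2 * (n / 2)) + Nat.fib (2 * (n / 2) + 1) :=
            Nat.fib_add_two
          rw [h3]
          push_cast
          rw [hfe, hfo]
      · rw [dif_neg h, if_neg hpar]
        simp only [pvF, Prod.mk.injEq]
        refine ⟨?_, ?_⟩
        · have hn0 : n = 2 * (n / 2) := by omega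
          conv_rhs => rw [hn0]
          exact hfe.symm
        · have h2 : n + 1 = 2 * (n / 2) + 1 := by omega
          conv_rhs => rw [h2]
          exact hfo.symm

theorem warmup_eq (inicio : Int) :
    (PySem.List.pyRange 0 (inicio - 1) 1).foldl
      (fun (ab : Int × Int) _ => (ab.2, ab.1 + ab.2)) (0, 1)
    = pvFibPair (if inicio > 1 then (inicio - 1).toNat else 0) := by
  have h0 : ((0 : Int), (1 : Int)) = pvF 0 := by simp [pvF]
  rw [h0, foldl_step, pvFibPair_eq]
  congr 1
  rw [PySem.List.length_pyRange_one]
  by_cases h : inicio > 1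
  · simp [h]
  · have : (inicio - 1).toNat = 0 := by omega
    simp [h, this]

-- ===== VERDICT (by name: the statement is the Claim_ definition above) =====
theorem generar_fibonacci_spec : Claim_equal_generar_fibonacci := by
  intro inicio iteraciones _
  unfold Spec_generar_fibonacci generar_fibonacci generar_fibonacci_alt
  rw [warmup_eq inicio]
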